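-- pv_equiv track=rewrite | github.com/Wuon/CCI | Leetcode/1337.the-k-weakest-rows-in-a-matrix.py | kWeakestRows
-- ===== SOURCE A (Python) =====
-- from typing import List
--
-- def kWeakestRows(mat: List[List[int]], k: int) -> List[int]:
--     output = {}
--     for i, row in enumerate(mat):
--         count = 0
--         for item in row:
--             if item == 1:
--                 count += 1
--         output[i] = count
--     return (sorted(output, key=output.get)[:k])
-- ===== SOURCE B (Python) =====
-- from typing import List
--
-- def kWeakestRows(mat: List[List[int]], k: int) -> List[int]:
--     # Group row indices by their count of 1s, then walk the distinct counts
--     # in increasing order; each group keeps indices in row order.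
--     buckets = {}
--     for i, row in enumerate(mat):
--         buckets.setdefault(row.count(1), []).append(i)
--     out = []
--     for c in sorted(buckets):
--         out.extend(buckets[c])
--     return out[:k]
-- ===== Notes on version B (the rewrite author's own statement) =====
-- stated objective: alternative
-- what changed: Replaces the stable sort of all row indices keyed by a per-index count dict with a grouping dict (count -> list of indices) whose groups are concatenated in increasing order of the distinct counts.
import Mathlib
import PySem

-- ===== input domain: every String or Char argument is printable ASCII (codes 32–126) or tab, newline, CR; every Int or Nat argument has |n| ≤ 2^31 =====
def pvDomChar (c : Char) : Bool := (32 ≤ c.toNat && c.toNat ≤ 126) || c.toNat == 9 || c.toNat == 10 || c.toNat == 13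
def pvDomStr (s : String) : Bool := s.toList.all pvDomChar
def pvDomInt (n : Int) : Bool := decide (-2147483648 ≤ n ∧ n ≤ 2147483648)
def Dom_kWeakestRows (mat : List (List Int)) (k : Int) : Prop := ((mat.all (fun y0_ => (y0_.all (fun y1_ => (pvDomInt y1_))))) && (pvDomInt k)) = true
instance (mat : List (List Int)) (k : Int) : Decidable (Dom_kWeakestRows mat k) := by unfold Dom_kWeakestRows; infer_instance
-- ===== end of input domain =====

-- B groups row indices by 1-count into a dict and concatenates the groups in
-- increasing count order instead of stably sorting all indices by count (objective: alternative).

-- ===== PORT A =====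
def kWeakestRows (mat : List (List Int)) (k : Int) : List Int :=
  let output : PySem.Dict Int Int :=
    (PySem.List.enumerate mat 0).foldl
      (fun d p => d.insert p.1 (p.2.foldl (fun c item => if item == 1 then c + 1 else c) 0))
      PySem.Dict.empty
  -- key=output.get: every key iterated is present in output, so .get i = .getD i 0 here
  PySem.List.slice (PySem.List.sorted output.keys (fun i => output.getD i 0) false) none (some k)

-- ===== PORT B =====
def kWeakestRows_alt (mat : List (List Int)) (k : Int) : List Int :=
  -- buckets.setdefault(c, []).append(i)  ==  buckets[c] = buckets.get(c, []) + [i]  ==  Dict.modify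
  let buckets : PySem.Dict Int (List Int) :=
    (PySem.List.enumerate mat 0).foldl
      (fun d p => d.modify ((PySem.List.count p.2 1 : Nat) : Int) [] (fun g => g ++ [p.1]))
      PySem.Dict.empty
  let out := (PySem.List.sorted buckets.keys (fun c => c) false).foldl
      (fun acc c => acc ++ buckets.getD c []) []
  PySem.List.slice out none (some k)

-- ===== PRECONDITION & SPEC =====
def Spec_kWeakestRows (mat : List (List Int)) (k : Int) (out : List Int) : Prop := out = kWeakestRows_alt mat k
instance (mat : List (List Int)) (k : Int) (out : List Int) : Decidable (Spec_kWeakestRows mat k out) := by unfold Spec_kWeakestRows; infer_instance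

-- ===== CLAIM (what is proved, stated in full; the proofs are below) =====
def Claim_equal_kWeakestRows : Prop := ∀ (mat : List (List Int)) (k : Int), Dom_kWeakestRows mat k → Spec_kWeakestRows mat k (kWeakestRows mat k)

-- ===== LEMMAS AND PROOFS =====

def pvDictA (mat : List (List Int)) : PySem.Dict Int Int :=
  (PySem.List.enumerate mat 0).foldl
    (fun d p => d.insert p.1 (p.2.foldl (fun c item => if item == 1 then c + 1 else c) 0))
    PySem.Dict.empty

def pvBuckets (mat : List (List Int)) : PySem.Dict Int (List Int) :=
  (PySem.List.enumerate mat 0).foldl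
    (fun d p => d.modify ((PySem.List.count p.2 1 : Nat) : Int) [] (fun g => g ++ [p.1]))
    PySem.Dict.empty

def pvPairs (mat : List (List Int)) : List (Int × Int) :=
  (PySem.List.enumerate mat 0).map (fun p => (((PySem.List.count p.2 1 : Nat) : Int), p.1))

theorem pv_items (mat : List (List Int)) :
    (pvDictA mat).items = (PySem.List.enumerate mat 0).map
      (fun p => (p.1, p.2.foldl (fun c item => if item == 1 then c + 1 else c) 0)) := by
  have hnd : ((PySem.List.enumerate mat 0).map (fun p => p.1)).Nodup := by
    have := PySem.List.pairwise_lt_enumerate mat 0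
    exact (List.pairwise_map.mpr this).imp (fun h => ne_of_lt h)
  have := PySem.Dict.items_foldl_insert_fresh (PySem.List.enumerate mat 0)
      (fun p => p.1) (fun p => p.2.foldl (fun c item => if item == 1 then c + 1 else c) (0:Int))
      PySem.Dict.empty (fun a _ => PySem.Dict.contains_empty _) hnd
  simpa [pvDictA] using this

theorem pv_keys (mat : List (List Int)) :
    (pvDictA mat).keys = (PySem.List.enumerate mat 0).map (fun p => p.1) := by
  simp only [PySem.Dict.keys, pv_items, List.map_map]
  rfl

theorem pv_nodup_fst (mat : List (List Int)) :
    ((PySem.List.enumerate mat 0).map (fun p => p.1)).Nodup :=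
  (List.pairwise_map.mpr (PySem.List.pairwise_lt_enumerate mat 0)).imp (fun h => ne_of_lt h)

theorem pv_getD (mat : List (List Int)) (p : Int × List Int) (hp : p ∈ PySem.List.enumerate mat 0) :
    (pvDictA mat).getD p.1 0 = ((List.count 1 p.2 : Nat) : Int) := by
  have hmem : (p.1, p.2.foldl (fun c item => if item == 1 then c + 1 else c) 0) ∈ (pvDictA mat).items := by
    rw [pv_items]; exact List.mem_map_of_mem hp
  have hnd : (pvDictA mat).keys.Nodup := by rw [pv_keys]; exact pv_nodup_fst mat
  have := PySem.Dict.getD_of_mem_items _ hmem hnd 0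
  rw [this, PySem.List.foldl_beq_add_one]
  simp

theorem pv_g0_pair (mat : List (List Int)) (q : Int × Int) (hq : q ∈ pvPairs mat) :
    (pvDictA mat).getD q.2 0 = q.1 := by
  obtain ⟨p, hp, rfl⟩ := List.mem_map.mp hq
  have := pv_getD mat p hp
  simpa [PySem.List.count_eq] using this

theorem pv_buckets_eq (mat : List (List Int)) :
    pvBuckets mat = (pvPairs mat).foldl (fun d q => d.modify q.1 [] (fun g => g ++ [q.2])) PySem.Dict.empty := by
  rw [pvPairs, List.foldl_map]
  rfl

theorem pv_getD_buckets (mat : List (List Int)) (c : Int) :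
    (pvBuckets mat).getD c [] = ((pvPairs mat).filter (fun q => q.1 == c)).map (fun q => q.2) := by
  rw [pv_buckets_eq]
  have := PySem.Dict.getD_foldl_modify_append (pvPairs mat) PySem.Dict.empty c
  simpa using this

theorem pv_keys_buckets (mat : List (List Int)) :
    (pvBuckets mat).keys = PySem.Set.ofList ((pvPairs mat).map (fun q => q.1)) := by
  rw [pv_buckets_eq]
  have := PySem.Dict.keys_foldl_modify_key (pvPairs mat) (fun q => q.1) []
      (fun _ q => fun g => g ++ [q.2]) PySem.Dict.empty
  simpa [PySem.Set.update, PySem.Set.ofList] using this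
def LexLt (key : Int → Int) (a b : Int) : Prop := key a < key b ∨ (key a = key b ∧ a < b)

theorem insertBy_pairwise_lex (key : Int → Int) (x : Int) (ys : List Int)
    (hys : ys.Pairwise (LexLt key)) (hlt : ∀ y ∈ ys, y < x) :
    (PySem.List.insertBy (fun a b => decide (key a < key b)) x ys).Pairwise (LexLt key) := by
  induction ys with
  | nil => simp [PySem.List.insertBy, LexLt]
  | cons y ys ih =>
    rw [List.pairwise_cons] at hys
    by_cases h : key x < key y
    · simp only [PySem.List.insertBy, h, decide_true, if_true]
      refine List.pairwise_cons.mpr ⟨?_, List.pairwise_cons.mpr ⟨hys.1, hys.2⟩⟩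
      intro z hz
      rcases List.mem_cons.mp hz with rfl | hz
      · exact Or.inl h
      · have hyz := hys.1 z hz
        rcases hyz with h2 | ⟨h2, _⟩
        · exact Or.inl (lt_trans h h2)
        · exact Or.inl (h2 ▸ h)
    · simp only [PySem.List.insertBy, h, decide_false]
      refine List.pairwise_cons.mpr ⟨?_, ih hys.2 (fun z hz => hlt z (List.mem_cons_of_mem _ hz))⟩
      intro z hz
      rcases (PySem.List.mem_insertBy _ _ _ _).mp hz with rfl | hz
      · rcases lt_or_eq_of_le (le_of_not_gt h) with h2 | h2
        · exact Or.inl h2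
        · exact Or.inr ⟨h2, hlt y (List.mem_cons_self)⟩
      · exact hys.1 z hz

theorem foldl_insertBy_pairwise_lex (key : Int → Int) (xs acc : List Int)
    (hacc : acc.Pairwise (LexLt key))
    (hmem : ∀ a ∈ acc, ∀ b ∈ xs, a < b)
    (hxs : xs.Pairwise (· < ·)) :
    (xs.foldl (fun acc x => PySem.List.insertBy (fun a b => decide (key a < key b)) x acc) acc).Pairwise (LexLt key) := by
  induction xs generalizing acc with
  | nil => exact hacc
  | cons x xs ih =>
    rw [List.pairwise_cons] at hxs
    refine ih _ (insertBy_pairwise_lex key x acc hacc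
      (fun a ha => hmem a ha x List.mem_cons_self)) ?_ hxs.2
    intro a ha b hb
    rcases (PySem.List.mem_insertBy _ _ _ _).mp ha with rfl | ha
    · exact hxs.1 b hb
    · exact hmem a ha b (List.mem_cons_of_mem _ hb)

theorem sorted_pairwise_lexlt (key : Int → Int) (xs : List Int) (hxs : xs.Pairwise (· < ·)) :
    (PySem.List.sorted xs key false).Pairwise (LexLt key) := by
  rw [PySem.List.sorted_eq_foldl_insertBy]
  exact foldl_insertBy_pairwise_lex key xs [] (by simp) (by simp) hxs

theorem flatMap_groups_perm (cs : List Int) (pairs : List (Int × Int))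
    (hnd : cs.Nodup) (hcov : ∀ p ∈ pairs, p.1 ∈ cs) :
    (cs.flatMap (fun c => (pairs.filter (fun p => p.1 == c)).map (·.2))).Perm (pairs.map (·.2)) := by
  induction cs generalizing pairs with
  | nil =>
    cases pairs with
    | nil => simp
    | cons p ps => exact absurd (hcov p List.mem_cons_self) (List.not_mem_nil)
  | cons c cs ih =>
    rw [List.flatMap_cons]
    rw [List.nodup_cons] at hnd
    have hperm := List.filter_append_perm (fun p => p.1 == c) pairs
    have hrest : (cs.flatMap (fun c' => ((pairs.filter (fun p => !(p.1 == c))).filter (fun p => p.1 == c')).map (·.2))).Perm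
        ((pairs.filter (fun p => !(p.1 == c))).map (·.2)) := by
      refine ih _ hnd.2 ?_
      intro p hp
      rw [List.mem_filter] at hp
      have := hcov p hp.1
      rcases List.mem_cons.mp this with h | h
      · simp [h] at hp
      · exact h
    have heq : ∀ c' ∈ cs, ((pairs.filter (fun p => !(p.1 == c))).filter (fun p => p.1 == c')) = pairs.filter (fun p => p.1 == c') := by
      intro c' hc'
      rw [List.filter_filter]
      apply List.filter_congr
      intro p _
      by_cases h : p.1 = c'
      · have h2 : c' ≠ c := fun hc => hnd.1 (hc ▸ hc')
        simp [h, h2]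
      · simp [h]
    rw [List.flatMap_congr (fun c' hc' => by rw [heq c' hc'])] at hrest
    have h3 := hrest.append_left ((pairs.filter (fun p => p.1 == c)).map (·.2))
    rw [← List.map_append] at h3
    exact h3.trans (hperm.map _)

theorem pv_pairs_snd (mat : List (List Int)) :
    (pvPairs mat).map (fun q => q.2) = (PySem.List.enumerate mat 0).map (fun p => p.1) := by
  rw [pvPairs, List.map_map]; rfl

theorem pv_lists_eq (mat : List (List Int)) :
    PySem.List.sorted (pvDictA mat).keys (fun i => (pvDictA mat).getD i 0) false
      = (PySem.List.sorted (pvBuckets mat).keys (fun c => c) false).foldl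
          (fun acc c => acc ++ (pvBuckets mat).getD c []) [] := by
  set g0 : Int → Int := fun i => (pvDictA mat).getD i 0 with hg0
  set pairs := pvPairs mat with hpairs
  set cs := PySem.List.sorted (pvBuckets mat).keys (fun c => c) false with hcs
  -- the B-side list is a flatMap of groups
  rw [PySem.List.foldl_append_eq_flatMap, List.nil_append]
  rw [List.flatMap_congr (fun c _ => pv_getD_buckets mat c)]
  -- facts about cs
  have hkeysB := pv_keys_buckets mat
  have hcs_pairwise : cs.Pairwise (· < ·) := by
    rw [hcs, hkeysB]; exact PySem.List.sorted_ofList_pairwise_lt _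
  have hcs_nodup : cs.Nodup := hcs_pairwise.imp (fun h => ne_of_lt h)
  have hcov : ∀ q ∈ pairs, q.1 ∈ cs := by
    intro q hq
    rw [hcs, PySem.List.mem_sorted, hkeysB, PySem.Set.mem_ofList]
    exact List.mem_map_of_mem hq
  -- permutations
  have hpermB := flatMap_groups_perm cs pairs hcs_nodup hcov
  have hpermA : (PySem.List.sorted (pvDictA mat).keys g0 false).Perm (pairs.map (fun q => q.2)) := by
    rw [pv_pairs_snd, ← pv_keys]
    exact PySem.List.sorted_perm _ _ _
  -- pairwise lex on the A side (stability of the sort)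
  have hlexA : (PySem.List.sorted (pvDictA mat).keys g0 false).Pairwise (LexLt g0) := by
    apply sorted_pairwise_lexlt
    rw [pv_keys]
    exact List.pairwise_map.mpr (PySem.List.pairwise_lt_enumerate mat 0)
  -- pairwise lex on the B side
  have hpairs_pair : pairs.Pairwise (fun p q => p.2 < q.2) := by
    rw [hpairs, pvPairs]
    exact List.pairwise_map.mpr (PySem.List.pairwise_lt_enumerate mat 0)
  have hmemgrp : ∀ (c : Int), ∀ x ∈ (pairs.filter (fun q => q.1 == c)).map (fun q => q.2), g0 x = c := by
    intro c x hx
    obtain ⟨q, hq, rfl⟩ := List.mem_map.mp hx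
    rw [List.mem_filter] at hq
    have := pv_g0_pair mat q hq.1
    show (pvDictA mat).getD q.2 0 = c
    rw [this]
    exact eq_of_beq hq.2
  have hlexB : (cs.flatMap (fun c => (pairs.filter (fun q => q.1 == c)).map (fun q => q.2))).Pairwise (LexLt g0) := by
    rw [List.flatMap_def]
    rw [List.pairwise_flatten]
    constructor
    · intro l hl
      obtain ⟨c, _, rfl⟩ := List.mem_map.mp hl
      apply List.pairwise_map.mpr
      refine (hpairs_pair.filter _).imp_of_mem ?_
      intro p q hp hq hlt
      refine Or.inr ⟨?_, hlt⟩
      have h1 := hmemgrp c p.2 (List.mem_map_of_mem hp)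
      have h2 := hmemgrp c q.2 (List.mem_map_of_mem hq)
      rw [h1, h2]
    · apply List.pairwise_map.mpr
      refine hcs_pairwise.imp ?_
      intro c c' hcc x hx y hy
      exact Or.inl (by rw [hmemgrp c x hx, hmemgrp c' y hy]; exact hcc)
  -- conclude with the injective lex key
  refine PySem.List.eq_of_perm_of_pairwise_le_of_injective
    (key := fun i => toLex ((g0 i, i) : Int × Int)) ?_ (hpermA.trans hpermB.symm) ?_ ?_
  · intro a b h
    simpa using congrArg (fun x => (ofLex x).2) h
  · exact hlexA.imp (fun h => le_of_lt (Prod.Lex.lt_iff.mpr h))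
  · exact hlexB.imp (fun h => le_of_lt (Prod.Lex.lt_iff.mpr h))

theorem pv_ports_eq (mat : List (List Int)) (k : Int) :
    kWeakestRows mat k = kWeakestRows_alt mat k :=
  congrArg (fun l => PySem.List.slice l none (some k)) (pv_lists_eq mat)

-- ===== VERDICT (by name: the statement is the Claim_ definition above) =====
theorem kWeakestRows_spec : Claim_equal_kWeakestRows := by
  intro mat k _
  exact pv_ports_eq mat k
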